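-- pv_equiv track=rewrite | github.com/ToddMorrill/survival-moe | survkit/data.py | record_patient_id_to_idxs
-- ===== SOURCE A (Python) =====
-- def record_patient_id_to_idxs(
--                               patient_id_to_row_idxs,
--                               set_dfs,
--                               set_ids,
--                               start_idx=0):
--     # record mapping of patient_id to row index
--     idx = start_idx
--     for patient_id in set_ids:
--         idx_start = idx
--         idx_end = idx + len(set_dfs[patient_id])
--         patient_id_to_row_idxs[patient_id] = (idx_start, idx_end)
--         idx = idx_end
--     return patient_id_to_row_idxs, idx
-- ===== SOURCE B (Python) =====
-- def record_patient_id_to_idxs(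
--                               patient_id_to_row_idxs,
--                               set_dfs,
--                               set_ids,
--                               start_idx=0):
--     # two-pass: lengths, then all cumulative boundaries at once, then bulk assign
--     lengths = [len(set_dfs[patient_id]) for patient_id in set_ids]
--     offsets = [start_idx]
--     for n in lengths:
--         offsets.append(offsets[-1] + n)
--     for patient_id, lo, hi in zip(set_ids, offsets, offsets[1:]):
--         patient_id_to_row_idxs[patient_id] = (lo, hi)
--     return patient_id_to_row_idxs, offsets[-1]
-- ===== Notes on version B (the rewrite author's own statement) =====
-- stated objective: alternative
-- what changed: Replaces the single loop carrying a running index and mutating the dict per step by a two-pass scheme: a lengths list, a prefix-sum offsets list of length n+1, and a zip over consecutive offset pairs to fill the dict.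
import Mathlib
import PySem

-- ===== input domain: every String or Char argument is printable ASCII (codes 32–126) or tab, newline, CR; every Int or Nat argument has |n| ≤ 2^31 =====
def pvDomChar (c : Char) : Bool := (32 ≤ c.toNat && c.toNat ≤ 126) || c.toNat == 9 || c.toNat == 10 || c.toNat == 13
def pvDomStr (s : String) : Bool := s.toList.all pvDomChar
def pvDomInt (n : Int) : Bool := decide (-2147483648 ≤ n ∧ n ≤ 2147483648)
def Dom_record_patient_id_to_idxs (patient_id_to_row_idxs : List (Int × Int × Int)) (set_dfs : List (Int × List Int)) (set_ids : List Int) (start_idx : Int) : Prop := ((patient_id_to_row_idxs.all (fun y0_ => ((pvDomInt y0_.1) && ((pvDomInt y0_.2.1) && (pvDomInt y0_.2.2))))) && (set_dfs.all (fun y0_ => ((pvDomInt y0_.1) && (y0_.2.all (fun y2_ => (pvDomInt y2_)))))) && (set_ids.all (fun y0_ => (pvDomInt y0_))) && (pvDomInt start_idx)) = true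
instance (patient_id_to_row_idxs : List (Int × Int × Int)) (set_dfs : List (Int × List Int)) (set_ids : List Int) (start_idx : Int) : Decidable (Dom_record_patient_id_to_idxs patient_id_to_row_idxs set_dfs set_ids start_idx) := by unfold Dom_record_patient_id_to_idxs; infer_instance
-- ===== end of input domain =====

-- B replaces A's single running-index loop by a two-pass scheme (lengths list, prefix-sum
-- offsets list, then a zip filling the dict); return-value equivalence (both mutate the dict
-- argument in Python, in the same way).


-- ===== PORT A =====
-- loop 'for patient_id in set_ids' carrying (dict, idx); 'set_dfs[patient_id]' (KeyError when
-- missing, excluded by Pre_) ported via Dict.get? with getD [] outside Pre_.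
def record_patient_id_to_idxs (patient_id_to_row_idxs : List (Int × Int × Int)) (set_dfs : List (Int × List Int)) (set_ids : List Int) (start_idx : Int) : (List (Int × Int × Int)) × Int :=
  let sd : PySem.Dict Int (List Int) := PySem.Dict.mk set_dfs
  let r := set_ids.foldl
    (fun (st : PySem.Dict Int (Int × Int) × Int) patient_id =>
      let idx_start := st.2
      let idx_end := st.2 + (((sd.get? patient_id).getD []).length : Int)
      (st.1.insert patient_id (idx_start, idx_end), idx_end))
    (PySem.Dict.mk patient_id_to_row_idxs, start_idx)
  (r.1.items, r.2)

-- ===== PORT B =====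
def record_patient_id_to_idxs_alt (patient_id_to_row_idxs : List (Int × Int × Int)) (set_dfs : List (Int × List Int)) (set_ids : List Int) (start_idx : Int) : (List (Int × Int × Int)) × Int :=
  let sd : PySem.Dict Int (List Int) := PySem.Dict.mk set_dfs
  let lengths : List Int := set_ids.map (fun patient_id => (((sd.get? patient_id).getD []).length : Int))
  let offsets : List Int := lengths.foldl (fun o n => o ++ [o.getLastD 0 + n]) [start_idx]
  let d := (set_ids.zip (offsets.zip offsets.tail)).foldl
    (fun (d : PySem.Dict Int (Int × Int)) p => d.insert p.1 (p.2.1, p.2.2))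
    (PySem.Dict.mk patient_id_to_row_idxs)
  (d.items, offsets.getLastD 0)

-- ===== PRECONDITION & SPEC =====
-- Pre_ excludes inputs where some id in set_ids is not a key of set_dfs: there the Python A
-- (and Python B alike) raises KeyError.
def Pre_record_patient_id_to_idxs (patient_id_to_row_idxs : List (Int × Int × Int)) (set_dfs : List (Int × List Int)) (set_ids : List Int) (start_idx : Int) : Prop :=
  ∀ pid ∈ set_ids, pid ∈ set_dfs.map (·.1)
instance (patient_id_to_row_idxs : List (Int × Int × Int)) (set_dfs : List (Int × List Int)) (set_ids : List Int) (start_idx : Int) : Decidable (Pre_record_patient_id_to_idxs patient_id_to_row_idxs set_dfs set_ids start_idx) := by unfold Pre_record_patient_id_to_idxs; infer_instance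
def pvWitness_record_patient_id_to_idxs : (List (Int × Int × Int)) × (List (Int × List Int)) × List Int × Int :=
  ([(9, 0, 1)], [(1, [4, 5]), (2, [6])], [1, 2, 1], 3)
def Spec_record_patient_id_to_idxs (patient_id_to_row_idxs : List (Int × Int × Int)) (set_dfs : List (Int × List Int)) (set_ids : List Int) (start_idx : Int) (out : (List (Int × Int × Int)) × Int) : Prop := out = record_patient_id_to_idxs_alt patient_id_to_row_idxs set_dfs set_ids start_idx
instance (patient_id_to_row_idxs : List (Int × Int × Int)) (set_dfs : List (Int × List Int)) (set_ids : List Int) (start_idx : Int) (out : (List (Int × Int × Int)) × Int) : Decidable (Spec_record_patient_id_to_idxs patient_id_to_row_idxs set_dfs set_ids start_idx out) := by unfold Spec_record_patient_id_to_idxs; infer_instance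

-- ===== CLAIM (what is proved, stated in full; the proofs are below) =====
def Claim_equal_record_patient_id_to_idxs : Prop := ∀ (patient_id_to_row_idxs : List (Int × Int × Int)) (set_dfs : List (Int × List Int)) (set_ids : List Int) (start_idx : Int), Dom_record_patient_id_to_idxs patient_id_to_row_idxs set_dfs set_ids start_idx → Pre_record_patient_id_to_idxs patient_id_to_row_idxs set_dfs set_ids start_idx → Spec_record_patient_id_to_idxs patient_id_to_row_idxs set_dfs set_ids start_idx (record_patient_id_to_idxs patient_id_to_row_idxs set_dfs set_ids start_idx)

-- ===== LEMMAS AND PROOFS =====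

-- proof-only recursive characterisation of B's offsets tail
def pvOffs (s : Int) : List Int → List Int
  | [] => []
  | n :: l => (s + n) :: pvOffs (s + n) l

theorem pvOff_shift (l : List Int) : ∀ (pre : List Int) (s : Int),
    l.foldl (fun o n => o ++ [o.getLastD 0 + n]) (pre ++ [s]) = (pre ++ [s]) ++ pvOffs s l := by
  induction l with
  | nil => intro pre s; simp [pvOffs]
  | cons n l ih =>
    intro pre s
    have hlast : (pre ++ [s]).getLastD 0 = s := by simp
    simp only [List.foldl_cons, hlast, pvOffs]
    have : pre ++ [s] ++ [s + n] = (pre ++ [s]) ++ [s + n] := by simp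
    rw [this, ih (pre ++ [s]) (s + n)]
    simp

theorem pvOff_base (l : List Int) (s : Int) :
    l.foldl (fun o n => o ++ [o.getLastD 0 + n]) [s] = s :: pvOffs s l := by
  have := pvOff_shift l [] s
  simpa using this

theorem pvMain (lenOf : Int → Int) :
    ∀ (ids : List Int) (d : PySem.Dict Int (Int × Int)) (s : Int),
    ids.foldl
      (fun (st : PySem.Dict Int (Int × Int) × Int) patient_id =>
        (st.1.insert patient_id (st.2, st.2 + lenOf patient_id), st.2 + lenOf patient_id))
      (d, s)
    = ((ids.zip ((s :: pvOffs s (ids.map lenOf)).zip (pvOffs s (ids.map lenOf)))).foldl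
         (fun (d : PySem.Dict Int (Int × Int)) p => d.insert p.1 (p.2.1, p.2.2)) d,
       (s :: pvOffs s (ids.map lenOf)).getLastD 0) := by
  intro ids
  induction ids with
  | nil => intro d s; simp [pvOffs]
  | cons pid rest ih =>
    intro d s
    simp only [List.foldl_cons, List.map_cons, pvOffs, List.zip_cons_cons]
    rw [ih (d.insert pid (s, s + lenOf pid)) (s + lenOf pid)]
    cases pvOffs (s + lenOf pid) (rest.map lenOf) <;> simp

-- ===== VERDICT (by name: the statement is the Claim_ definition above) =====
theorem record_patient_id_to_idxs_spec : Claim_equal_record_patient_id_to_idxs := by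
  intro pr sd ids s _ _
  show _ = _
  unfold record_patient_id_to_idxs record_patient_id_to_idxs_alt
  simp only [pvOff_base]
  rw [pvMain (fun pid => ((((PySem.Dict.mk sd).get? pid).getD []).length : Int)) ids (PySem.Dict.mk pr) s]
  simp
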